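-- pv_equiv track=rewrite | github.com/gabrieldiniz107/tireinspect | core/views.py | gerar_posicoes_personalizadas
-- ===== SOURCE A (Python) =====
-- def gerar_posicoes_personalizadas(axles: int, tires: int) -> list[str]:
--     """
--     Retorna exatamente `tires` labels na ordem:
--       - Primeiro todos do lado esquerdo: 1E,2E, depois ED+EF nos eixos extras
--       - Depois todos do lado direito: 1D,2D, depois DD+DF
--     """
--     # início: um pneu por eixo/lado
--     left = [f"{i}E" for i in range(1, axles + 1)]
--     right = [f"{i}D" for i in range(1, axles + 1)]
--     # quantos pares extras (dual) substituir
--     extra_pairs = (tires - axles * 2) // 2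
--
--     # do eixo mais alto para o 1, substitui
--     for axle in range(axles, 0, -1):
--         if extra_pairs <= 0:
--             break
--         idx = left.index(f"{axle}E")
--         left[idx:idx+1] = [f"{axle}ED", f"{axle}EF"]
--         idx = right.index(f"{axle}D")
--         right[idx:idx+1] = [f"{axle}DD", f"{axle}DF"]
--         extra_pairs -= 1
--
--     return left + right
-- ===== SOURCE B (Python) =====
-- def gerar_posicoes_personalizadas(axles: int, tires: int) -> list[str]:
--     # k = number of top axles that become dual: clamp of (tires - 2*axles)//2 to [0, axles]
--     k = min(max(0, (tires - 2 * axles) // 2), axles)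
--     left: list[str] = []
--     right: list[str] = []
--     for i in range(1, axles + 1):
--         if i > axles - k:
--             left += [f"{i}ED", f"{i}EF"]
--             right += [f"{i}DD", f"{i}DF"]
--         else:
--             left.append(f"{i}E")
--             right.append(f"{i}D")
--     return left + right
-- ===== Notes on version B (the rewrite author's own statement) =====
-- stated objective: simpler
-- what changed: Replaces the reverse loop that repeatedly list.index-scans and splice-assigns into the label lists by precomputing k = clamp((tires-2*axles)//2, 0, axles) and building both sides in one forward append-only pass.
import Mathlib
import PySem

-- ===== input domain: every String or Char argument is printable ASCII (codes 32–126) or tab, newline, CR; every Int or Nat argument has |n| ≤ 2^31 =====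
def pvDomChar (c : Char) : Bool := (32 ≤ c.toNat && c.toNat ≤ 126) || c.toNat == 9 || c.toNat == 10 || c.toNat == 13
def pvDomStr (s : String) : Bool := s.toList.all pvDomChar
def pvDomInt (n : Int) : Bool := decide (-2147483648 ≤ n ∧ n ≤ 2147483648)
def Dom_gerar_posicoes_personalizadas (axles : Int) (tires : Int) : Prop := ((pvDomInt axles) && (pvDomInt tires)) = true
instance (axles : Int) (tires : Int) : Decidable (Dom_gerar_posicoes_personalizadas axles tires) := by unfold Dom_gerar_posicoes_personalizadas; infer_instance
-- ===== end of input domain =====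

-- B replaces A's reverse splice-and-index loop by one forward pass with a precomputed
-- dual-axle count k = clamp((tires-2*axles)//2, 0, axles); objective: simpler.


-- ===== PORT A =====
-- the 'for axle in range(axles, 0, -1)' loop with its 'break'; state = (left, right, extra_pairs)
def pvSpliceLoop : List Int → List String → List String → Int → List String × List String
  | [], left, right, _ => (left, right)
  | axle :: rest, left, right, extra_pairs =>
    if extra_pairs ≤ 0 then (left, right)            -- 'break'
    else
      match PySem.List.index? left (PySem.Int.toStr axle ++ "E") with
      | none => (left, right)                        -- unreachable: the label is in the list (Python would raise ValueError)
      | some idx =>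
        -- left[idx:idx+1] = [..]: slice assignment at a valid nonnegative index, ported by hand (exact there)
        let left' := left.take idx ++ [PySem.Int.toStr axle ++ "ED", PySem.Int.toStr axle ++ "EF"] ++ left.drop (idx+1)
        match PySem.List.index? right (PySem.Int.toStr axle ++ "D") with
        | none => (left', right)                     -- unreachable likewise
        | some jdx =>
          let right' := right.take jdx ++ [PySem.Int.toStr axle ++ "DD", PySem.Int.toStr axle ++ "DF"] ++ right.drop (jdx+1)
          pvSpliceLoop rest left' right' (extra_pairs - 1)

def gerar_posicoes_personalizadas (axles : Int) (tires : Int) : List String :=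
  let left := (PySem.List.pyRange 1 (axles+1) 1).map (fun i => PySem.Int.toStr i ++ "E")
  let right := (PySem.List.pyRange 1 (axles+1) 1).map (fun i => PySem.Int.toStr i ++ "D")
  let extra_pairs := PySem.Int.floordiv (tires - axles*2) 2
  let lr := pvSpliceLoop (PySem.List.pyRange axles 0 (-1)) left right extra_pairs
  lr.1 ++ lr.2

-- ===== PORT B =====
def gerar_posicoes_personalizadas_alt (axles : Int) (tires : Int) : List String :=
  let k := min (max 0 (PySem.Int.floordiv (tires - 2*axles) 2)) axles
  let lr := (PySem.List.pyRange 1 (axles+1) 1).foldl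
    (fun (lr : List String × List String) i =>
      if axles - k < i then
        (lr.1 ++ [PySem.Int.toStr i ++ "ED", PySem.Int.toStr i ++ "EF"],
         lr.2 ++ [PySem.Int.toStr i ++ "DD", PySem.Int.toStr i ++ "DF"])
      else
        (lr.1 ++ [PySem.Int.toStr i ++ "E"], lr.2 ++ [PySem.Int.toStr i ++ "D"]))
    ([], [])
  lr.1 ++ lr.2

-- ===== PRECONDITION & SPEC =====
def Spec_gerar_posicoes_personalizadas (axles : Int) (tires : Int) (out : List String) : Prop := out = gerar_posicoes_personalizadas_alt axles tires
instance (axles : Int) (tires : Int) (out : List String) : Decidable (Spec_gerar_posicoes_personalizadas axles tires out) := by unfold Spec_gerar_posicoes_personalizadas; infer_instance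

-- ===== CLAIM (what is proved, stated in full; the proofs are below) =====
def Claim_equal_gerar_posicoes_personalizadas : Prop := ∀ (axles : Int) (tires : Int), Dom_gerar_posicoes_personalizadas axles tires → Spec_gerar_posicoes_personalizadas axles tires (gerar_posicoes_personalizadas axles tires)

-- ===== LEMMAS AND PROOFS =====

-- Injectivity of str(n) on nonnegative ints (Nat.toDigits 10), proved from toDigitsCore.
theorem pv_tdc_unfold (b f n : Nat) (acc : List Char) : Nat.toDigitsCore b (f+1) n acc =
    if n / b = 0 then Nat.digitChar (n % b) :: acc
    else Nat.toDigitsCore b f (n / b) (Nat.digitChar (n % b) :: acc) := by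
  rw [Nat.toDigitsCore]

theorem pv_tdc_shift (b : Nat) : ∀ (f n : Nat) (acc : List Char),
    Nat.toDigitsCore b f n acc = Nat.toDigitsCore b f n [] ++ acc := by
  intro f
  induction f with
  | zero => intro n acc; simp [Nat.toDigitsCore]
  | succ f ih =>
    intro n acc
    rw [pv_tdc_unfold, pv_tdc_unfold]
    by_cases h : n / b = 0
    · simp [h]
    · simp only [h, if_false]
      rw [ih (n / b) (Nat.digitChar (n % b) :: acc), ih (n / b) [Nat.digitChar (n % b)]]
      simp

theorem pv_tdc_fuel (b : Nat) (hb : 2 ≤ b) : ∀ (n f f' : Nat), n < f → n < f' →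
    Nat.toDigitsCore b f n [] = Nat.toDigitsCore b f' n [] := by
  intro n
  induction n using Nat.strong_induction_on with
  | _ n ih =>
    intro f f' hf hf'
    obtain ⟨f0, rfl⟩ : ∃ f0, f = f0 + 1 := ⟨f - 1, by omega⟩
    obtain ⟨f0', rfl⟩ : ∃ f0', f' = f0' + 1 := ⟨f' - 1, by omega⟩
    rw [pv_tdc_unfold, pv_tdc_unfold]
    by_cases h : n / b = 0
    · simp [h]
    · simp only [h, if_false]
      have hn : 0 < n := Nat.pos_of_ne_zero (fun e => h (by simp [e]))
      have hlt : n / b < n := Nat.div_lt_self hn (by omega)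
      have h1 : n / b < f0 := by omega
      have h2 : n / b < f0' := by omega
      rw [pv_tdc_shift, pv_tdc_shift b f0', ih (n / b) hlt f0 f0' h1 h2]

theorem pv_toDigits_step (b n : Nat) (hb : 2 ≤ b) (h : b ≤ n) :
    Nat.toDigits b n = Nat.toDigits b (n / b) ++ [Nat.digitChar (n % b)] := by
  show Nat.toDigitsCore b (n+1) n [] = _
  obtain ⟨m, rfl⟩ : ∃ m, n = m + 1 := ⟨n - 1, by omega⟩
  rw [pv_tdc_unfold]
  have h0 : (m+1) / b ≠ 0 := by
    have := Nat.div_pos h (by omega); omega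
  simp only [h0, if_false]
  rw [pv_tdc_shift]
  show _ = Nat.toDigitsCore b ((m+1)/b + 1) ((m+1)/b) [] ++ _
  rw [pv_tdc_fuel b hb ((m+1)/b) (m+1) ((m+1)/b + 1) (Nat.div_lt_self (by omega) (by omega)) (by omega)]

theorem pv_toDigits_small (b n : Nat) (h : n < b) : Nat.toDigits b n = [Nat.digitChar n] := by
  show Nat.toDigitsCore b (n+1) n [] = _
  rw [pv_tdc_unfold]
  simp [Nat.div_eq_of_lt h, Nat.mod_eq_of_lt h]

theorem pv_digitChar_inj10 (a c : Nat) (ha : a < 10) (hc : c < 10) (h : Nat.digitChar a = Nat.digitChar c) : a = c := by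
  interval_cases a <;> interval_cases c <;> simp_all [Nat.digitChar]

theorem pv_toDigits_ne_nil (b n : Nat) : Nat.toDigits b n ≠ [] := by
  show Nat.toDigitsCore b (n+1) n [] ≠ []
  rw [pv_tdc_unfold]
  by_cases h : n / b = 0
  · simp [h]
  · simp only [h, if_false]
    rw [pv_tdc_shift]
    simp

theorem pv_toDigits10_inj : ∀ (n m : Nat), Nat.toDigits 10 n = Nat.toDigits 10 m → n = m := by
  intro n
  induction n using Nat.strong_induction_on with
  | _ n ih =>
    intro m h
    by_cases hn : n < 10 <;> by_cases hm : m < 10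
    · rw [pv_toDigits_small 10 n hn, pv_toDigits_small 10 m hm] at h
      exact pv_digitChar_inj10 n m hn hm (by simpa using h)
    · rw [pv_toDigits_small 10 n hn, pv_toDigits_step 10 m (by omega) (by omega)] at h
      have hl := congrArg List.length h
      simp only [List.length_append, List.length_cons, List.length_nil] at hl
      exact absurd (List.length_eq_zero_iff.mp (by omega)) (pv_toDigits_ne_nil 10 (m/10))
    · rw [pv_toDigits_step 10 n (by omega) (by omega), pv_toDigits_small 10 m hm] at h
      have hl := congrArg List.length h
      simp only [List.length_append, List.length_cons, List.length_nil] at hl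
      exact absurd (List.length_eq_zero_iff.mp (by omega)) (pv_toDigits_ne_nil 10 (n/10))
    · rw [pv_toDigits_step 10 n (by omega) (by omega), pv_toDigits_step 10 m (by omega) (by omega)] at h
      obtain ⟨h1, h2⟩ := List.append_inj' h (by simp)
      have hd := ih (n/10) (Nat.div_lt_self (by omega) (by omega)) (m/10) h1
      have hm2 := pv_digitChar_inj10 (n%10) (m%10) (by omega) (by omega) (by simpa using h2)
      omega

theorem pv_toStr_inj_nonneg (a c : Int) (ha : 0 ≤ a) (hc : 0 ≤ c) (h : PySem.Int.toStr a = PySem.Int.toStr c) : a = c := by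
  have h' : PySem.Int.toChars a = PySem.Int.toChars c := by
    have := congrArg String.toList h
    simpa [PySem.Int.toList_toStr] using this
  unfold PySem.Int.toChars at h'
  rw [if_neg (by omega), if_neg (by omega)] at h'
  have := pv_toDigits10_inj a.toNat c.toNat h'
  omega

theorem pv_label_ne (a c : Int) (s : String) (ha : 0 ≤ a) (hc : 0 ≤ c) (hne : a ≠ c) :
    PySem.Int.toStr a ++ s ≠ PySem.Int.toStr c ++ s := by
  intro h
  apply hne
  apply pv_toStr_inj_nonneg a c ha hc
  have h' := congrArg String.toList h
  simp only [String.toList_append] at h'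
  exact String.toList_inj.mp (List.append_cancel_right h')

-- the mixed label list: single labels for axles 1..t, dual labels for axles t+1..n
def pvMix (s d1 d2 : String) (n t : Int) : List String :=
  (PySem.List.pyRange 1 (t+1) 1).map (fun i => PySem.Int.toStr i ++ s)
  ++ (PySem.List.pyRange (t+1) (n+1) 1).flatMap (fun i => [PySem.Int.toStr i ++ d1, PySem.Int.toStr i ++ d2])

theorem pv_label_not_mem (s : String) (t : Int) :
    PySem.Int.toStr t ++ s ∉ (PySem.List.pyRange 1 t 1).map (fun i => PySem.Int.toStr i ++ s) := by
  intro hmem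
  obtain ⟨i, hi, hlab⟩ := List.mem_map.mp hmem
  rw [PySem.List.mem_pyRange_one] at hi
  exact pv_label_ne i t s (by omega) (by omega) (by omega) hlab

theorem pv_mix_index (s d1 d2 : String) (n : Int) (tn : Nat) :
    PySem.List.index? (pvMix s d1 d2 n ((tn:Int)+1)) (PySem.Int.toStr ((tn:Int)+1) ++ s) = some tn := by
  unfold pvMix
  rw [PySem.List.index?_append_of_mem _ (by
    apply List.mem_map.mpr
    exact ⟨(tn:Int)+1, PySem.List.mem_pyRange_one.mpr (by omega), rfl⟩)]
  rw [PySem.List.pyRange_one_succ_right (by omega), List.map_append, List.map_singleton]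
  rw [PySem.List.index?_append_singleton_self _ _ (pv_label_not_mem s ((tn:Int)+1))]
  simp [PySem.List.length_pyRange_one]

theorem pv_splice_lists (tn : Nat) (P S : List String) (x y z : String) (hP : P.length = tn) :
    (P ++ [x] ++ S).take tn ++ [y, z] ++ (P ++ [x] ++ S).drop (tn + 1) = P ++ [y, z] ++ S := by
  subst hP
  rw [List.append_assoc P [x] S, List.take_left]
  have h1 : P.length + 1 = (P ++ [x]).length := by simp
  rw [← List.append_assoc, h1, List.drop_left]

theorem pv_mix_splice (s d1 d2 : String) (n : Int) (tn : Nat) (h : (tn:Int)+1 ≤ n) :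
    (pvMix s d1 d2 n ((tn:Int)+1)).take tn
      ++ [PySem.Int.toStr ((tn:Int)+1) ++ d1, PySem.Int.toStr ((tn:Int)+1) ++ d2]
      ++ (pvMix s d1 d2 n ((tn:Int)+1)).drop (tn+1)
    = pvMix s d1 d2 n tn := by
  unfold pvMix
  rw [PySem.List.pyRange_one_succ_right (a := 1) (b := (tn:Int)+1) (by omega), List.map_append, List.map_singleton]
  have hP : ((PySem.List.pyRange 1 ((tn:Int)+1) 1).map (fun i => PySem.Int.toStr i ++ s)).length = tn := by
    simp [PySem.List.length_pyRange_one]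
  rw [pv_splice_lists tn _ _ _ _ _ hP]
  rw [PySem.List.pyRange_one_cons (a := (tn:Int)+1) (b := n+1) (by omega), List.flatMap_cons]
  simp

-- the loop, started at axle t with the t-to-n suffix already dual, finishes min(max(0,ep),t) more axles
theorem pv_loop_spec (n : Int) (tn : Nat) : ∀ (ep : Int), (tn:Int) ≤ n →
    pvSpliceLoop (PySem.List.pyRange tn 0 (-1)) (pvMix "E" "ED" "EF" n tn) (pvMix "D" "DD" "DF" n tn) ep
    = (pvMix "E" "ED" "EF" n ((tn:Int) - min (max 0 ep) tn),
       pvMix "D" "DD" "DF" n ((tn:Int) - min (max 0 ep) tn)) := by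
  induction tn with
  | zero =>
    intro ep _
    rw [PySem.List.pyRange_neg_one_eq_nil (by omega)]
    simp only [pvSpliceLoop]
    have : min (max 0 ep) ((0:Nat):Int) = 0 := by omega
    rw [this]
    norm_num
  | succ tn ih =>
    intro ep h
    rw [show (((tn+1:Nat)):Int) = (tn:Int)+1 by push_cast; ring] at *
    rw [PySem.List.pyRange_neg_one_cons (by omega)]
    simp only [pvSpliceLoop]
    by_cases hep : ep ≤ 0
    · rw [if_pos hep]
      have : min (max 0 ep) ((tn:Int)+1) = 0 := by omega
      rw [this]
      norm_num
    · rw [if_neg hep]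
      rw [show (tn:Int)+1-1 = (tn:Int) by ring]
      rw [pv_mix_index "E" "ED" "EF" n tn, pv_mix_index "D" "DD" "DF" n tn]
      simp only
      rw [pv_mix_splice "E" "ED" "EF" n tn h, pv_mix_splice "D" "DD" "DF" n tn h]
      rw [ih (ep - 1) (by omega)]
      have : (tn:Int) - min (max 0 (ep-1)) (tn:Int) = (tn:Int) + 1 - min (max 0 ep) ((tn:Int)+1) := by omega
      rw [this]

-- B's fold accumulates by appending: pull the appends out
theorem pv_foldl_pairs (xs : List Int) (f g : Int → List String) : ∀ (l0 r0 : List String),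
    xs.foldl (fun lr i => (lr.1 ++ f i, lr.2 ++ g i)) (l0, r0) = (l0 ++ xs.flatMap f, r0 ++ xs.flatMap g) := by
  induction xs with
  | nil => intro l0 r0; simp
  | cons x xs ih =>
    intro l0 r0
    simp only [List.foldl_cons, List.flatMap_cons, ih]
    simp

-- ===== VERDICT (by name: the statement is the Claim_ definition above) =====
theorem gerar_posicoes_personalizadas_spec : Claim_equal_gerar_posicoes_personalizadas := by
  intro axles tires _
  unfold Spec_gerar_posicoes_personalizadas
  unfold gerar_posicoes_personalizadas gerar_posicoes_personalizadas_alt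
  simp only
  by_cases hax : axles ≤ 0
  · rw [PySem.List.pyRange_one_eq_nil (by omega), PySem.List.pyRange_neg_one_eq_nil (by omega)]
    simp [pvSpliceLoop]
  · -- axles = tn > 0
    obtain ⟨tn, htn⟩ : ∃ tn : Nat, axles = (tn:Int) := ⟨axles.toNat, by omega⟩
    subst htn
    set ep := PySem.Int.floordiv (tires - (tn:Int)*2) 2 with hep
    set k := min (max 0 ep) (tn:Int) with hk
    have hk2 : min (max 0 (PySem.Int.floordiv (tires - 2*(tn:Int)) 2)) (tn:Int) = k := by
      rw [hk, hep, mul_comm]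
    -- A's side: initial lists are pvMix … tn tn
    have hinitE : (PySem.List.pyRange 1 ((tn:Int)+1) 1).map (fun i => PySem.Int.toStr i ++ "E")
        = pvMix "E" "ED" "EF" (tn:Int) (tn:Int) := by
      unfold pvMix
      rw [PySem.List.pyRange_one_eq_nil (a := (tn:Int)+1) (by omega)]
      simp
    have hinitD : (PySem.List.pyRange 1 ((tn:Int)+1) 1).map (fun i => PySem.Int.toStr i ++ "D")
        = pvMix "D" "DD" "DF" (tn:Int) (tn:Int) := by
      unfold pvMix
      rw [PySem.List.pyRange_one_eq_nil (a := (tn:Int)+1) (by omega)]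
      simp
    rw [hinitE, hinitD, pv_loop_spec (tn:Int) tn ep (by omega), hk2]
    -- B's side
    have hstep : (fun (lr : List String × List String) i =>
        if (tn:Int) - k < i then
          (lr.1 ++ [PySem.Int.toStr i ++ "ED", PySem.Int.toStr i ++ "EF"],
           lr.2 ++ [PySem.Int.toStr i ++ "DD", PySem.Int.toStr i ++ "DF"])
        else (lr.1 ++ [PySem.Int.toStr i ++ "E"], lr.2 ++ [PySem.Int.toStr i ++ "D"]))
        = (fun (lr : List String × List String) i =>
          (lr.1 ++ (if (tn:Int) - k < i then [PySem.Int.toStr i ++ "ED", PySem.Int.toStr i ++ "EF"] else [PySem.Int.toStr i ++ "E"]),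
           lr.2 ++ (if (tn:Int) - k < i then [PySem.Int.toStr i ++ "DD", PySem.Int.toStr i ++ "DF"] else [PySem.Int.toStr i ++ "D"]))) := by
      funext lr i
      split_ifs <;> rfl
    rw [hstep, pv_foldl_pairs]
    have hklo : 0 ≤ k := by omega
    have hkhi : k ≤ (tn:Int) := by omega
    have hsplit : PySem.List.pyRange 1 ((tn:Int)+1) 1
        = PySem.List.pyRange 1 ((tn:Int)-k+1) 1 ++ PySem.List.pyRange ((tn:Int)-k+1) ((tn:Int)+1) 1 :=
      PySem.List.pyRange_one_append 1 ((tn:Int)-k+1) ((tn:Int)+1) (by omega) (by omega)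
    rw [hsplit, List.flatMap_append, List.flatMap_append]
    have hlow : ∀ (d1 d2 s : String), (PySem.List.pyRange 1 ((tn:Int)-k+1) 1).flatMap
        (fun i => if (tn:Int) - k < i then [PySem.Int.toStr i ++ d1, PySem.Int.toStr i ++ d2] else [PySem.Int.toStr i ++ s])
        = (PySem.List.pyRange 1 ((tn:Int)-k+1) 1).map (fun i => PySem.Int.toStr i ++ s) := by
      intro d1 d2 s
      have hc : ∀ x ∈ PySem.List.pyRange 1 ((tn:Int)-k+1) 1,
          (if (tn:Int) - k < x then [PySem.Int.toStr x ++ d1, PySem.Int.toStr x ++ d2] else [PySem.Int.toStr x ++ s])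
          = [PySem.Int.toStr x ++ s] := by
        intro x hx
        rw [PySem.List.mem_pyRange_one] at hx
        rw [if_neg (by omega)]
      rw [List.flatMap_congr hc, ← List.map_eq_flatMap]
    have hhigh : ∀ (d1 d2 s : String), (PySem.List.pyRange ((tn:Int)-k+1) ((tn:Int)+1) 1).flatMap
        (fun i => if (tn:Int) - k < i then [PySem.Int.toStr i ++ d1, PySem.Int.toStr i ++ d2] else [PySem.Int.toStr i ++ s])
        = (PySem.List.pyRange ((tn:Int)-k+1) ((tn:Int)+1) 1).flatMap
            (fun i => [PySem.Int.toStr i ++ d1, PySem.Int.toStr i ++ d2]) := by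
      intro d1 d2 s
      apply List.flatMap_congr
      intro x hx
      rw [PySem.List.mem_pyRange_one] at hx
      rw [if_pos (by omega)]
    rw [hlow, hhigh, hlow, hhigh, ← hk]
    unfold pvMix
    simp
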